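-- pv_equiv track=rewrite | github.com/Hansung-include/Coding-Test-Study | 19주차/1449/이준형_1449.py | solution
-- ===== SOURCE A (Python) =====
-- def solution(N, L, leaks):
--     start = leaks[0]
--     cnt = 1
--
--     if len(leaks) == 1:  # 새는 곳이 하나면 테이프 한개 필요
--         return 1
--
--     for leak in leaks[1:]:  # 새는 곳이 여러개일때
--         if L < leak-start+1:  # 하나의 테이프로 여러개를 막을수 있는 경우 체크
--             start = leak
--             cnt += 1
--
--     return cnt
-- ===== SOURCE B (Python) =====
-- def solution(N, L, leaks):
--     def go(xs, s):
--         # tapes opened while processing xs with current tape start s, and final start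
--         if not xs:
--             return (0, s)
--         if len(xs) == 1:
--             x = xs[0]
--             return (1, x) if L < x - s + 1 else (0, s)
--         m = len(xs) // 2
--         c1, s1 = go(xs[:m], s)
--         c2, s2 = go(xs[m:], s1)
--         return (c1 + c2, s2)
--     return 1 + go(leaks[1:], leaks[0])[0]
-- ===== Notes on version B (the rewrite author's own statement) =====
-- stated objective: alternative
-- what changed: A is a single linear pass keeping a (start,cnt) state; B is a divide-and-conquer recursion that splits the leak list in half, solves each half returning (tapes-opened, final-tape-start), and composes the halves by threading the left half's final start into the right half.
import Mathlib
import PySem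

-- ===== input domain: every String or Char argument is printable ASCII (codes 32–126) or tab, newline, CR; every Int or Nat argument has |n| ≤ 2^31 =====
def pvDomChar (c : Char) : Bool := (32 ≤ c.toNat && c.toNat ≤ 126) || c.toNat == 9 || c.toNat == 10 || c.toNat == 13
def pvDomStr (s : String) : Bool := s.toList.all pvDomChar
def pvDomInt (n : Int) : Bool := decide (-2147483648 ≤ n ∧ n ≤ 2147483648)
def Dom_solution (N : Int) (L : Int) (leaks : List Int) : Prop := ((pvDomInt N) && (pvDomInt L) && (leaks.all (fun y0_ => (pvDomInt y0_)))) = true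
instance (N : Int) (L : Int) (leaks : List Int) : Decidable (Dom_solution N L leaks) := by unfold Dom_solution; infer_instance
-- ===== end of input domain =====

-- B replaces A's linear (start,cnt) pass by a divide-and-conquer recursion over list halves
-- that composes (tapes-opened, final-start) results; return values proved equal (A raises on empty leaks, excluded by Pre_).

-- ===== PORT A =====
-- state is (start, cnt); the for-loop over leaks[1:] updates it exactly as A does
def solution (N : Int) (L : Int) (leaks : List Int) : Int :=
  match leaks with
  | [] => 0  -- unreachable under Pre_solution: Python A raises IndexError on leaks[0]
  | h :: t =>
    if t = [] then 1
    else
      (t.foldl (fun (s : Int × Int) leak =>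
        if L < leak - s.1 + 1 then (leak, s.2 + 1) else s) (h, 1)).2

-- ===== PORT B =====
-- B's recursive helper `go`: splits the list in half, threads the final start of the
-- left half into the right half, adds the tape counts
def tapeGo (L : Int) (xs : List Int) (s : Int) : Int × Int :=
  match xs with
  | [] => (0, s)
  | [x] => if L < x - s + 1 then (1, x) else (0, s)
  | a :: b :: rest =>
    let xs' := a :: b :: rest
    let m := xs'.length / 2
    let p1 := tapeGo L (xs'.take m) s
    let p2 := tapeGo L (xs'.drop m) p1.2
    (p1.1 + p2.1, p2.2)
termination_by xs.length
decreasing_by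
  · simp; omega
  · simp; omega

def solution_alt (N : Int) (L : Int) (leaks : List Int) : Int :=
  match leaks with
  | [] => 0  -- unreachable under Pre_solution: Python B raises IndexError on leaks[0]
  | h :: t => 1 + (tapeGo L t h).1

-- ===== PRECONDITION & SPEC =====
-- Pre_ excludes only the empty list, on which Python A (and B) raises IndexError at leaks[0].
def Pre_solution (N : Int) (L : Int) (leaks : List Int) : Prop := leaks ≠ []
instance (N : Int) (L : Int) (leaks : List Int) : Decidable (Pre_solution N L leaks) := by unfold Pre_solution; infer_instance
def pvWitness_solution : Int × Int × List Int := (7, 2, [1, 2, 5])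

def Spec_solution (N : Int) (L : Int) (leaks : List Int) (out : Int) : Prop := out = solution_alt N L leaks
instance (N : Int) (L : Int) (leaks : List Int) (out : Int) : Decidable (Spec_solution N L leaks out) := by unfold Spec_solution; infer_instance

-- ===== CLAIM (what is proved, stated in full; the proofs are below) =====
def Claim_equal_solution : Prop := ∀ (N : Int) (L : Int) (leaks : List Int), Dom_solution N L leaks → Pre_solution N L leaks → Spec_solution N L leaks (solution N L leaks)

-- ===== LEMMAS AND PROOFS =====

-- A's step function
def tapeStep (L : Int) (s : Int × Int) (leak : Int) : Int × Int :=
  if L < leak - s.1 + 1 then (leak, s.2 + 1) else s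

-- the start component of A's fold is independent of the count component
theorem foldl_step_fst (L : Int) (t : List Int) :
    ∀ (s c c' : Int),
      (t.foldl (tapeStep L) (s, c)).1 = (t.foldl (tapeStep L) (s, c')).1 := by
  induction t with
  | nil => intro s c c'; simp
  | cons x xs ih =>
    intro s c c'
    simp only [List.foldl_cons, tapeStep]
    by_cases h : L < x - s + 1
    · simp only [if_pos h]; exact ih x (c + 1) (c' + 1)
    · simp only [if_neg h]; exact ih s c c'

-- the count component of A's fold shifts with the initial count
theorem foldl_step_snd (L : Int) (t : List Int) :
    ∀ (s c : Int),
      (t.foldl (tapeStep L) (s, c)).2 = c + (t.foldl (tapeStep L) (s, 0)).2 := by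
  induction t with
  | nil => intro s c; simp
  | cons x xs ih =>
    intro s c
    simp only [List.foldl_cons, tapeStep]
    by_cases h : L < x - s + 1
    · simp only [if_pos h]
      rw [ih x (c + 1), ih x (0 + 1)]; ring
    · simp only [if_neg h]
      exact ih s c
-- B's divide-and-conquer helper computes A's fold (count from 0, and the final start)
theorem tapeGo_eq_foldl (L : Int) (xs : List Int) (s : Int) :
    tapeGo L xs s = ((xs.foldl (tapeStep L) (s, 0)).2, (xs.foldl (tapeStep L) (s, 0)).1) := by
  induction xs, s using tapeGo.induct L with
  | case1 s => simp [tapeGo]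
  | case2 s x h =>
    simp [tapeGo, tapeStep, h]
  | case3 s x h =>
    simp [tapeGo, tapeStep, h]
  | case4 s a b rest xsP mP p1P ih1 _ ih2 =>
    simp only [xsP, mP, p1P] at ih1 ih2
    simp only [ih1] at ih2
    rw [tapeGo]
    simp only [ih1, ih2]
    have hsplit : (a :: b :: rest) = ((a :: b :: rest).take ((a :: b :: rest).length / 2))
        ++ ((a :: b :: rest).drop ((a :: b :: rest).length / 2)) := by
      rw [List.take_append_drop]
    conv_rhs => rw [hsplit]
    rw [List.foldl_append]
    set tk := (a :: b :: rest).take ((a :: b :: rest).length / 2)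
    set dr := (a :: b :: rest).drop ((a :: b :: rest).length / 2)
    have h1 := foldl_step_snd L dr ((tk.foldl (tapeStep L) (s, 0)).1) ((tk.foldl (tapeStep L) (s, 0)).2)
    have h2 := foldl_step_fst L dr ((tk.foldl (tapeStep L) (s, 0)).1) ((tk.foldl (tapeStep L) (s, 0)).2) 0
    rw [show ((tk.foldl (tapeStep L) (s, 0)).1, (tk.foldl (tapeStep L) (s, 0)).2)
          = tk.foldl (tapeStep L) (s, 0) from rfl] at h1 h2
    rw [Prod.mk.injEq]
    refine ⟨?_, ?_⟩
    · rw [h1]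
    · exact h2.symm

-- ===== VERDICT (by name: the statement is the Claim_ definition above) =====
theorem solution_spec : Claim_equal_solution := by
  intro N L leaks _ hpre
  unfold Spec_solution solution solution_alt
  match leaks with
  | [] => exact absurd rfl hpre
  | h :: t =>
    simp only []
    rw [tapeGo_eq_foldl]
    by_cases ht : t = []
    · simp [ht]
    · simp only [if_neg ht]
      rw [show (fun (s : Int × Int) leak => if L < leak - s.1 + 1 then (leak, s.2 + 1) else s) = tapeStep L from rfl]
      have := foldl_step_snd L t h 1
      omega
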